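-- pv_equiv track=rewrite | github.com/imbillow/OI | beads.py | beads
-- ===== SOURCE A (Python) =====
-- def beads(lh, s):
--     s = s * 2
--
--     ans = 0
--     for i in range(lh):
--         cur = 0
--         flag = True
--         sign = 'w'
--         for c in s[i:]:
--             if c == 'w' or c == sign:
--                 cur += 1
--             elif sign == 'w':
--                 sign = c
--                 cur += 1
--             elif flag:
--                 sign = c
--                 cur += 1
--                 flag = not flag
--             else:
--                 break
--         ans = max(cur, ans)
--
--     return ans if ans < lh else lh
-- ===== SOURCE B (Python) =====
-- def beads(lh, s):
--     t = s * 2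
--     # Backward pass: for each suffix of t keep
--     #   W = leading wildcard ('w') count, S = length of first collectible segment
--     #   (first color's run incl. wildcards), T = length of the second segment,
--     #   fc = first color in the suffix (None if the suffix is all wildcards).
--     # The collectible length starting at i is S + T; one linear pass computes all.
--     W = 0
--     S = 0
--     T = 0
--     fc = None
--     rev = []
--     for c in reversed(t):
--         if c == 'w':
--             W, S = W + 1, S + 1
--         elif fc == c:
--             W, S = 0, S + 1
--         elif fc is None:
--             W, S, T, fc = 0, W + 1, 0, c
--         else:
--             W, S, T, fc = 0, W + 1, S - W, c
--         rev.append(S + T)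
--     rev.reverse()
--     ans = 0
--     for v in rev[:max(lh, 0)]:
--         ans = max(v, ans)
--     return ans if ans < lh else lh
-- ===== Notes on version B (the rewrite author's own statement) =====
-- stated objective: faster
-- what changed: A restarts a fresh forward scan from every start index (quadratic in the wildcard-heavy worst case); B makes one backward pass over the doubled string maintaining (wildcard-prefix, first-segment, second-segment, first-color) state that yields every start's collectible length in O(1), then takes the max of the first lh values.
import Mathlib
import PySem

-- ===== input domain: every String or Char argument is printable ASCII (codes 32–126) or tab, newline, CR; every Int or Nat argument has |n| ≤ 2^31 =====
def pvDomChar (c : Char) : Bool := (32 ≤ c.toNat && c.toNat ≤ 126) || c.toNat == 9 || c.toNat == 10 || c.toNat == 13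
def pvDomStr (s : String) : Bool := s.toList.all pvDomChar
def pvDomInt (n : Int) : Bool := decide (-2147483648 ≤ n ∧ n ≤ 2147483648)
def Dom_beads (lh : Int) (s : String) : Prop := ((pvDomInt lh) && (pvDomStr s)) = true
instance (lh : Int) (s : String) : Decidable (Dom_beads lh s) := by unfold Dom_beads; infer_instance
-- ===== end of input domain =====

-- B replaces A's quadratic restart-scan-per-start with one backward pass computing every
-- start's collectible length (objective: faster, single linear pass).

-- ===== PORT A =====
-- inner loop of A: for c in s[i:] with state (cur, flag, sign); 'break' returns cur
def beadsInner : List Char → Int → Bool → Char → Int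
  | [], cur, _, _ => cur
  | c :: rest, cur, flag, sign =>
    if c = 'w' ∨ c = sign then beadsInner rest (cur + 1) flag sign
    else if sign = 'w' then beadsInner rest (cur + 1) flag c
    else if flag then beadsInner rest (cur + 1) (!flag) c
    else cur

def beads (lh : Int) (s : String) : Int :=
  let s2 := s ++ s          -- s = s * 2
  let ans := (PySem.List.pyRange 0 lh 1).foldl
    (fun ans i => max (beadsInner (PySem.List.slice s2.toList (some i) none) 0 true 'w') ans) 0
  if ans < lh then ans else lh

-- ===== PORT B =====
-- backward pass of Source B (Python walks reversed(t) appending then reverses; the structural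
-- recursion from the right builds the same forward list directly).
-- state: (W leading-wildcard count, S first-segment length, T second-segment length,
--         fc first color, list of per-start values S+T)
def beadsGo : List Char → Int × Int × Int × Option Char × List Int
  | [] => (0, 0, 0, none, [])
  | c :: rest =>
    let st := beadsGo rest
    if c = 'w' then (st.1 + 1, st.2.1 + 1, st.2.2.1, st.2.2.2.1, (st.2.1 + 1 + st.2.2.1) :: st.2.2.2.2)
    else if st.2.2.2.1 = some c then (0, st.2.1 + 1, st.2.2.1, some c, (st.2.1 + 1 + st.2.2.1) :: st.2.2.2.2)
    else if st.2.2.2.1 = none then (0, st.1 + 1, 0, some c, (st.1 + 1 + 0) :: st.2.2.2.2)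
    else (0, st.1 + 1, st.2.1 - st.1, some c, (st.1 + 1 + (st.2.1 - st.1)) :: st.2.2.2.2)

def beads_alt (lh : Int) (s : String) : Int :=
  let t := (s ++ s).toList
  let vals := (beadsGo t).2.2.2.2
  let ans := (vals.take (max lh 0).toNat).foldl (fun ans v => max v ans) 0
  if ans < lh then ans else lh

-- ===== PRECONDITION & SPEC =====
def Spec_beads (lh : Int) (s : String) (out : Int) : Prop := out = beads_alt lh s
instance (lh : Int) (s : String) (out : Int) : Decidable (Spec_beads lh s out) := by unfold Spec_beads; infer_instance

-- ===== CLAIM (what is proved, stated in full; the proofs are below) =====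
def Claim_equal_beads : Prop := ∀ (lh : Int) (s : String), Dom_beads lh s → Spec_beads lh s (beads lh s)

-- ===== LEMMAS AND PROOFS =====

-- length of the maximal prefix of chars collectible with fixed sign c (c or wildcard)
def runlen (c : Char) : List Char → Int
  | [] => 0
  | d :: l => if d = 'w' ∨ d = c then 1 + runlen c l else 0

-- A's collectible length starting at the head of l
def curv (l : List Char) : Int := beadsInner l 0 true 'w'

-- forward list of curv over all suffixes
def curlist : List Char → List Int
  | [] => []
  | x :: l => curv (x :: l) :: curlist l

theorem inner_false (l : List Char) : ∀ (cur : Int) (c : Char), c ≠ 'w' →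
    beadsInner l cur false c = cur + runlen c l := by
  induction l with
  | nil => intro cur c _; simp [beadsInner, runlen]
  | cons d rest ih =>
    intro cur c hc
    by_cases h : d = 'w' ∨ d = c
    · simp only [beadsInner, runlen, if_pos h, ih _ c hc]; ring
    · simp only [beadsInner, runlen, if_neg h]
      have hdw : ¬ d = 'w' := fun hd => h (Or.inl hd)
      simp [hc]

theorem beadsGo_main (l : List Char) :
    ((beadsGo l).2.2.2.1 = none → (beadsGo l).2.1 = (beadsGo l).1 ∧ (beadsGo l).2.2.1 = 0)
    ∧ (∀ c : Char, c ≠ 'w' →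
        runlen c l = if (beadsGo l).2.2.2.1 = some c then (beadsGo l).2.1 else (beadsGo l).1)
    ∧ (∀ (cur : Int) (c : Char), c ≠ 'w' →
        beadsInner l cur true c
          = cur + (if (beadsGo l).2.2.2.1 = some c then (beadsGo l).2.1 + (beadsGo l).2.2.1 else (beadsGo l).2.1))
    ∧ (∀ cur : Int, beadsInner l cur true 'w' = cur + (beadsGo l).2.1 + (beadsGo l).2.2.1) := by
  induction l with
  | nil =>
    refine ⟨fun _ => ⟨rfl, rfl⟩, ?_, ?_, ?_⟩
    · intro c _; simp [beadsGo, runlen]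
    · intro cur c _; simp [beadsGo, beadsInner]
    · intro cur; simp [beadsGo, beadsInner]
  | cons x rest ih =>
    obtain ⟨ih1, ih2, ih3, ih4⟩ := ih
    by_cases hxw : x = 'w'
    · -- wildcard head
      subst hxw
      have hgo : beadsGo ('w' :: rest)
          = ((beadsGo rest).1 + 1, (beadsGo rest).2.1 + 1, (beadsGo rest).2.2.1,
             (beadsGo rest).2.2.2.1, ((beadsGo rest).2.1 + 1 + (beadsGo rest).2.2.1) :: (beadsGo rest).2.2.2.2) := by
        simp [beadsGo]
      refine ⟨?_, ?_, ?_, ?_⟩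
      · rw [hgo]; dsimp only; intro h
        obtain ⟨h1, h2⟩ := ih1 h
        exact ⟨by omega, h2⟩
      · intro c hc
        rw [hgo]; dsimp only
        rw [show runlen c ('w' :: rest) = 1 + runlen c rest from by simp [runlen]]
        rw [ih2 c hc]
        split_ifs <;> ring
      · intro cur c hc
        rw [hgo]; dsimp only
        rw [show beadsInner ('w' :: rest) cur true c = beadsInner rest (cur + 1) true c from by
          simp [beadsInner]]
        rw [ih3 (cur + 1) c hc]
        split_ifs <;> ring
      · intro cur
        rw [hgo]; dsimp only
        rw [show beadsInner ('w' :: rest) cur true 'w' = beadsInner rest (cur + 1) true 'w' from by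
          simp [beadsInner]]
        rw [ih4 (cur + 1)]
        ring
    · -- color head x ≠ 'w'
      have hset : ∃ S' T' : Int,
          beadsGo (x :: rest)
            = (0, S', T', some x, (S' + T') :: (beadsGo rest).2.2.2.2)
          ∧ S' + T' = 1 + (if (beadsGo rest).2.2.2.1 = some x
                            then (beadsGo rest).2.1 + (beadsGo rest).2.2.1 else (beadsGo rest).2.1)
          ∧ S' = 1 + (if (beadsGo rest).2.2.2.1 = some x then (beadsGo rest).2.1 else (beadsGo rest).1) := by
        by_cases h1 : (beadsGo rest).2.2.2.1 = some x
        · refine ⟨(beadsGo rest).2.1 + 1, (beadsGo rest).2.2.1, ?_, ?_, ?_⟩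
          · simp [beadsGo, hxw, h1]
          · simp [h1]; ring
          · simp [h1]; ring
        · by_cases h2 : (beadsGo rest).2.2.2.1 = none
          · obtain ⟨e1, e2⟩ := ih1 h2
            refine ⟨(beadsGo rest).1 + 1, 0, ?_, ?_, ?_⟩
            · simp [beadsGo, hxw, h2]
            · simp [h1]; omega
            · simp [h1]; ring
          · refine ⟨(beadsGo rest).1 + 1, (beadsGo rest).2.1 - (beadsGo rest).1, ?_, ?_, ?_⟩
            · simp [beadsGo, hxw, h1, h2]
            · simp [h1]; ring
            · simp [h1]; ring
      obtain ⟨S', T', hgo, hST, hS⟩ := hset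
      refine ⟨?_, ?_, ?_, ?_⟩
      · rw [hgo]; dsimp only; intro h; exact absurd h (by simp)
      · intro c hc
        rw [hgo]; dsimp only
        by_cases hxc : x = c
        · subst hxc
          rw [show runlen x (x :: rest) = 1 + runlen x rest from by simp [runlen]]
          rw [if_pos rfl, ih2 x hxw] at *
          linarith [hS]
        · rw [show runlen c (x :: rest) = 0 from by simp [runlen, hxw, hxc]]
          rw [if_neg (by simp [hxc])]
      · intro cur c hc
        rw [hgo]; dsimp only
        by_cases hxc : x = c
        · subst hxc
          rw [show beadsInner (x :: rest) cur true x = beadsInner rest (cur + 1) true x from by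
            simp [beadsInner]]
          rw [if_pos rfl, ih3 (cur + 1) x hxw]
          linarith [hST]
        · rw [show beadsInner (x :: rest) cur true c = beadsInner rest (cur + 1) false x from by
            simp [beadsInner, hxw, hxc, hc]]
          rw [if_neg (by simp [hxc]), inner_false rest (cur + 1) x hxw, ih2 x hxw]
          linarith [hS]
      · intro cur
        rw [hgo]; dsimp only
        rw [show beadsInner (x :: rest) cur true 'w' = beadsInner rest (cur + 1) true x from by
          simp [beadsInner, hxw]]
        rw [ih3 (cur + 1) x hxw]
        linarith [hST]

theorem curlist_eq (l : List Char) : (beadsGo l).2.2.2.2 = curlist l := by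
  induction l with
  | nil => rfl
  | cons x l ih =>
    have h4 := (beadsGo_main (x :: l)).2.2.2 0
    have hcv : curv (x :: l) = (beadsGo (x :: l)).2.1 + (beadsGo (x :: l)).2.2.1 := by
      rw [curv, h4]; ring
    rw [curlist, hcv, ← ih]
    simp only [beadsGo]
    split_ifs <;> rfl

theorem curlist_length (l : List Char) : (curlist l).length = l.length := by
  induction l with
  | nil => rfl
  | cons x l ih => simp [curlist, ih]

theorem curlist_drop (l : List Char) : ∀ i : Nat, (curlist l).drop i = curlist (l.drop i) := by
  induction l with
  | nil => intro i; simp [curlist]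
  | cons x l ih =>
    intro i
    cases i with
    | zero => rfl
    | succ i => simpa [curlist] using ih i

theorem curlist_get (l : List Char) (i : Nat) (h : i < l.length) :
    (curlist l)[i]? = some (curv (l.drop i)) := by
  rw [← List.head?_drop, curlist_drop]
  obtain ⟨y, rest, hy⟩ : ∃ y rest, l.drop i = y :: rest := by
    rcases hd : l.drop i with _ | ⟨y, rest⟩
    · exfalso; have := List.drop_eq_nil_iff.mp hd; omega
    · exact ⟨y, rest, rfl⟩
  rw [hy]; simp [curlist]

theorem foldr_max_max (xs : List Int) : ∀ (v b : Int),
    xs.foldr max (max v b) = max v (xs.foldr max b) := by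
  induction xs with
  | nil => intro v b; rfl
  | cons x xs ih =>
    intro v b
    simp only [List.foldr_cons, ih]
    exact max_left_comm x v _

theorem foldl_max_eq_foldr (xs : List Int) : ∀ (b : Int),
    xs.foldl (fun a v => max v a) b = xs.foldr max b := by
  induction xs with
  | nil => intro b; rfl
  | cons x xs ih =>
    intro b
    simp only [List.foldl_cons, List.foldr_cons, ih]
    exact foldr_max_max xs x b

theorem curv_def (l : List Char) : beadsInner l 0 true 'w' = curv l := rfl

theorem foldl_max_map (xs : List Nat) (g : Nat → Int) (b : Int) :
    xs.foldl (fun a k => max (g k) a) b = (xs.map g).foldr max b := by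
  induction xs generalizing b with
  | nil => rfl
  | cons x xs ih =>
    simp only [List.foldl_cons, List.map_cons, List.foldr_cons]
    rw [ih, foldr_max_max]

theorem le_foldr_max (xs : List Int) (b : Int) : b ≤ xs.foldr max b := by
  induction xs with
  | nil => exact le_refl _
  | cons x xs ih => exact le_trans ih (le_max_right x _)

theorem core (t : List Char) : ∀ n : Nat,
    ((List.range n).map (fun k => curv (t.drop k))).foldr max 0
      = ((curlist t).take n).foldr max 0 := by
  intro n
  induction n with
  | zero => simp
  | succ n ih =>
    rw [List.range_succ, List.map_append, List.foldr_append]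
    by_cases h : n < t.length
    · have hget : (curlist t)[n]? = some (curv (t.drop n)) := curlist_get t n h
      rw [List.take_add_one, hget, List.foldr_append]
      simp only [List.map_cons, List.map_nil, List.foldr_cons, List.foldr_nil, Option.toList_some]
      rw [foldr_max_max, foldr_max_max, ih]
    · have hlen : t.length ≤ n := le_of_not_gt h
      have hdrop : t.drop n = ([] : List Char) := by
        rw [List.drop_eq_nil_iff]; omega
      have htake : (curlist t).take (n + 1) = (curlist t).take n := by
        rw [List.take_of_length_le, List.take_of_length_le] <;> rw [curlist_length] <;> omega
      have hz : curv (t.drop n) = 0 := by rw [hdrop]; rfl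
      rw [htake, ← ih]
      simp only [List.map_cons, List.map_nil, List.foldr_cons, List.foldr_nil, hz]
      rw [foldr_max_max]
      exact max_eq_right (le_foldr_max _ 0)

theorem beads_eq (lh : Int) (s : String) : beads lh s = beads_alt lh s := by
  have key : (PySem.List.pyRange 0 lh 1).foldl
        (fun ans i => max (beadsInner (PySem.List.slice (s ++ s).toList (some i) none) 0 true 'w') ans) 0
      = (((beadsGo (s ++ s).toList).2.2.2.2).take (max lh 0).toNat).foldl (fun ans v => max v ans) 0 := by
    rw [curlist_eq]
    have hn : (max lh 0).toNat = lh.toNat := by omega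
    rw [hn, PySem.List.pyRange_one]
    have hsub : ((lh : Int) - 0).toNat = lh.toNat := by omega
    rw [hsub, List.foldl_map]
    have hsl : ∀ k : Nat,
        PySem.List.slice (s ++ s).toList (some ((0 : Int) + (k : Int))) none = (s ++ s).toList.drop k := by
      intro k; rw [zero_add]; exact PySem.List.slice_from_natCast _ _
    simp only [hsl, curv_def]
    rw [foldl_max_map, foldl_max_eq_foldr]
    exact core (s ++ s).toList lh.toNat
  show (if (PySem.List.pyRange 0 lh 1).foldl
        (fun ans i => max (beadsInner (PySem.List.slice (s ++ s).toList (some i) none) 0 true 'w') ans) 0 < lh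
      then (PySem.List.pyRange 0 lh 1).foldl
        (fun ans i => max (beadsInner (PySem.List.slice (s ++ s).toList (some i) none) 0 true 'w') ans) 0 else lh)
    = (if (((beadsGo (s ++ s).toList).2.2.2.2).take (max lh 0).toNat).foldl (fun ans v => max v ans) 0 < lh
      then (((beadsGo (s ++ s).toList).2.2.2.2).take (max lh 0).toNat).foldl (fun ans v => max v ans) 0 else lh)
  rw [key]


-- ===== VERDICT (by name: the statement is the Claim_ definition above) =====
theorem beads_spec : Claim_equal_beads := by
  intro lh s _
  exact beads_eq lh s
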